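-- pv_equiv track=rewrite | github.com/Ilya758/leetcode-sltns | prefixSum/medium/widestPairOfIndices.py | widestPairOfIndices
-- ===== SOURCE A (Python) =====
-- def widestPairOfIndices(nums1: list[int], nums2: list[int]) -> int:
--     cache = {0: -1}
--     ans = total = 0
--     n = len(nums1)
--
--     for i in range(n):
--         total += nums1[i] - nums2[i]
--
--         if total in cache:
--             ans = max(ans, i - cache[total])
--         else:
--             cache[total] = i
--
--     return ans
-- ===== SOURCE B (Python) =====
-- def widestPairOfIndices(nums1: list[int], nums2: list[int]) -> int:
--     # Prefix-difference sequence: ps[k] = sum of nums1[:k]) - sum(nums2[:k]).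
--     ps = [0]
--     t = 0
--     for a, b in zip(nums1, nums2):
--         t += a - b
--         ps.append(t)
--     # Brute force: widest gap between a pair of equal prefix differences.
--     best = 0
--     n = len(ps)
--     for j in range(n):
--         for i in range(j + 1, n):
--             if ps[j] == ps[i] and i - j > best:
--                 best = i - j
--     return best
-- ===== Notes on version B (the rewrite author's own statement) =====
-- stated objective: alternative
-- what changed: A's single fused pass with a hash map of first occurrences is replaced by a dict-free two-stage algorithm: first materialize the prefix-difference array ps (with leading 0), then a brute-force double loop over all index pairs (j, i) of ps keeping the widest gap with ps[j] == ps[i].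
import Mathlib
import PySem

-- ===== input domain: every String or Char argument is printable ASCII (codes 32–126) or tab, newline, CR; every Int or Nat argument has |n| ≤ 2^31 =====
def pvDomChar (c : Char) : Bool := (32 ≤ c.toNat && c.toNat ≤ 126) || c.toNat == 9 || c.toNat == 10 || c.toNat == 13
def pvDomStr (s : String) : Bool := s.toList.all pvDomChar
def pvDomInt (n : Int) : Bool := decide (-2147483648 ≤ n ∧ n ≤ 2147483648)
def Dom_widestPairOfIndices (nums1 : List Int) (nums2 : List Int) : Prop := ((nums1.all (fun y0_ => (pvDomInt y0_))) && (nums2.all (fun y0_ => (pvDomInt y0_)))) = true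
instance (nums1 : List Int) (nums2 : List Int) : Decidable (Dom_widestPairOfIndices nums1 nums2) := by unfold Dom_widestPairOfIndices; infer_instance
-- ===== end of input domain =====

-- B replaces A's single fused pass with a hash map of first occurrences by a dict-free
-- two-stage algorithm: build the prefix-difference array ps (with leading 0), then a
-- brute-force double loop over all index pairs of ps keeping the widest equal-value gap.

-- ===== PORT A =====
def widestPairOfIndices (nums1 : List Int) (nums2 : List Int) : Int :=
  let n : Int := nums1.length
  let res := (PySem.List.pyRange 0 n 1).foldl
    (fun (s : PySem.Dict Int Int × Int × Int) i =>
      let total := s.2.2 + (PySem.List.pyGetD nums1 i 0 - PySem.List.pyGetD nums2 i 0)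
      if s.1.contains total then
        (s.1, max s.2.1 (i - s.1.getD total 0), total)
      else
        (s.1.insert total i, s.2.1, total))
    (PySem.Dict.ofList [((0 : Int), (-1 : Int))], (0 : Int), (0 : Int))
  res.2.1

-- ===== PORT B =====
def widestPairOfIndices_alt (nums1 : List Int) (nums2 : List Int) : Int :=
  let s := (nums1.zip nums2).foldl
    (fun (s : List Int × Int) ab =>
      let t := s.2 + (ab.1 - ab.2)
      (s.1 ++ [t], t)) ([(0 : Int)], (0 : Int))
  let ps := s.1
  let n : Int := ps.length
  (PySem.List.pyRange 0 n 1).foldl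
    (fun best j =>
      (PySem.List.pyRange (j + 1) n 1).foldl
        (fun best i =>
          if PySem.List.pyGetD ps j 0 = PySem.List.pyGetD ps i 0 ∧ i - j > best then i - j
          else best)
        best)
    0

-- ===== PRECONDITION & SPEC =====
-- Pre_ excludes exactly the inputs where Python A raises IndexError (nums2 shorter than
-- nums1, so nums2[i] is out of range); A returns no value there.
def Pre_widestPairOfIndices (nums1 : List Int) (nums2 : List Int) : Prop :=
  nums1.length ≤ nums2.length
instance (nums1 : List Int) (nums2 : List Int) : Decidable (Pre_widestPairOfIndices nums1 nums2) := by unfold Pre_widestPairOfIndices; infer_instance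
def pvWitness_widestPairOfIndices : List Int × List Int := ([1, 2, 1], [2, 1, 1])

def Spec_widestPairOfIndices (nums1 : List Int) (nums2 : List Int) (out : Int) : Prop := out = widestPairOfIndices_alt nums1 nums2
instance (nums1 : List Int) (nums2 : List Int) (out : Int) : Decidable (Spec_widestPairOfIndices nums1 nums2 out) := by unfold Spec_widestPairOfIndices; infer_instance

-- ===== CLAIM (what is proved, stated in full; the proofs are below) =====
def Claim_equal_widestPairOfIndices : Prop := ∀ (nums1 : List Int) (nums2 : List Int), Dom_widestPairOfIndices nums1 nums2 → Pre_widestPairOfIndices nums1 nums2 → Spec_widestPairOfIndices nums1 nums2 (widestPairOfIndices nums1 nums2)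

-- ===== LEMMAS AND PROOFS =====

/-- A's loop body, as a function of the enumerated pair element. -/
def pvAStep (s : PySem.Dict Int Int × Int × Int) (e : Int × (Int × Int)) :
    PySem.Dict Int Int × Int × Int :=
  let total := s.2.2 + (e.2.1 - e.2.2)
  if s.1.contains total then
    (s.1, max s.2.1 (e.1 - s.1.getD total 0), total)
  else
    (s.1.insert total e.1, s.2.1, total)

/-- The prefix-difference values after the head: successive running totals. -/
def pvTail (t : Int) : List (Int × Int) → List Int
  | [] => []
  | ab :: r => (t + (ab.1 - ab.2)) :: pvTail (t + (ab.1 - ab.2)) r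

/-- `a` is the widest gap between two equal entries of `ps` (0 if none). -/
def pvIsBest (ps : List Int) (a : Int) : Prop :=
  0 ≤ a ∧
  (∀ j i : Int, 0 ≤ j → j < i → i < (ps.length : Int) →
    PySem.List.pyGetD ps j 0 = PySem.List.pyGetD ps i 0 → i - j ≤ a) ∧
  (a = 0 ∨ ∃ j i : Int, 0 ≤ j ∧ j < i ∧ i < (ps.length : Int) ∧
    PySem.List.pyGetD ps j 0 = PySem.List.pyGetD ps i 0 ∧ a = i - j)

lemma pvIsBest_unique {ps : List Int} {a b : Int}
    (ha : pvIsBest ps a) (hb : pvIsBest ps b) : a = b := by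
  obtain ⟨ha0, haub, haat⟩ := ha
  obtain ⟨hb0, hbub, hbat⟩ := hb
  have h1 : a ≤ b := by
    rcases haat with h | ⟨j, i, h1, h2, h3, h4, h5⟩
    · omega
    · have := hbub j i h1 h2 h3 h4; omega
  have h2 : b ≤ a := by
    rcases hbat with h | ⟨j, i, h1, h2, h3, h4, h5⟩
    · omega
    · have := haub j i h1 h2 h3 h4; omega
  omega

lemma pvTail_length (t : Int) (zs : List (Int × Int)) :
    (pvTail t zs).length = zs.length := by
  induction zs generalizing t with
  | nil => simp [pvTail]
  | cons ab r ih => simp [pvTail, ih]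

lemma pvBuild (zs : List (Int × Int)) : ∀ (acc : List Int) (t : Int),
    ((zs.foldl (fun (s : List Int × Int) ab =>
      let t := s.2 + (ab.1 - ab.2)
      (s.1 ++ [t], t)) (acc, t))).1 = acc ++ pvTail t zs := by
  induction zs with
  | nil => intro acc t; simp [pvTail]
  | cons ab r ih =>
    intro acc t
    simp only [List.foldl_cons]
    rw [ih]
    simp [pvTail]

lemma pvP_zero (t : Int) (l : List Int) :
    PySem.List.pyGetD (t :: l) 0 0 = t := by
  rw [PySem.List.pyGetD_of_nonneg _ _ (by omega)]
  simp

lemma pvTail_getD_succ : ∀ (zs : List (Int × Int)) (t : Int) (m : Nat), m < zs.length →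
    (t :: pvTail t zs).getD (m + 1) 0
      = (t :: pvTail t zs).getD m 0 + ((zs.getD m (0, 0)).1 - (zs.getD m (0, 0)).2) := by
  intro zs
  induction zs with
  | nil => intro t m hm; simp at hm
  | cons ab r ih =>
    intro t m hm
    cases m with
    | zero => simp [pvTail]
    | succ m =>
      have hm' : m < r.length := by simpa using hm
      have := ih (t + (ab.1 - ab.2)) m hm'
      simpa [pvTail] using this

lemma pvP_succ (zs : List (Int × Int)) (t : Int) (m : Nat) (hm : m < zs.length) :
    PySem.List.pyGetD (t :: pvTail t zs) ((m : Int) + 1) 0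
      = PySem.List.pyGetD (t :: pvTail t zs) (m : Int) 0
        + ((zs.getD m (0, 0)).1 - (zs.getD m (0, 0)).2) := by
  rw [PySem.List.pyGetD_of_nonneg _ _ (by omega), PySem.List.pyGetD_of_nonneg _ _ (by omega)]
  have h1 : ((m : Int) + 1).toNat = m + 1 := by omega
  have h2 : ((m : Int)).toNat = m := by omega
  rw [h1, h2]
  exact pvTail_getD_succ zs t m hm

/-- The loop invariant for A: after processing `m` elements, `cache` is the table of first
occurrences (shifted by one) of the prefix values, `ans` the widest gap so far. -/
def pvInvA (zs : List (Int × Int)) (m : Nat) (cache : PySem.Dict Int Int)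
    (ans total : Int) : Prop :=
  m ≤ zs.length ∧
  total = PySem.List.pyGetD ((0 : Int) :: pvTail 0 zs) (m : Int) 0 ∧
  cache.keys.Nodup ∧
  (∀ p ∈ cache.items, -1 ≤ p.2 ∧ p.2 + 1 ≤ (m : Int) ∧
    PySem.List.pyGetD ((0 : Int) :: pvTail 0 zs) (p.2 + 1) 0 = p.1 ∧
    (∀ q : Int, 0 ≤ q → q ≤ (m : Int) →
      PySem.List.pyGetD ((0 : Int) :: pvTail 0 zs) q 0 = p.1 → p.2 + 1 ≤ q)) ∧
  (∀ q : Int, 0 ≤ q → q ≤ (m : Int) →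
    cache.contains (PySem.List.pyGetD ((0 : Int) :: pvTail 0 zs) q 0) = true) ∧
  0 ≤ ans ∧
  (∀ j i : Int, 0 ≤ j → j < i → i ≤ (m : Int) →
    PySem.List.pyGetD ((0 : Int) :: pvTail 0 zs) j 0
      = PySem.List.pyGetD ((0 : Int) :: pvTail 0 zs) i 0 → i - j ≤ ans) ∧
  (ans = 0 ∨ ∃ j i : Int, 0 ≤ j ∧ j < i ∧ i ≤ (m : Int) ∧
    PySem.List.pyGetD ((0 : Int) :: pvTail 0 zs) j 0
      = PySem.List.pyGetD ((0 : Int) :: pvTail 0 zs) i 0 ∧ ans = i - j)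

lemma pvAStep_pres (zs : List (Int × Int)) (m : Nat) (hm : m < zs.length)
    (cache : PySem.Dict Int Int) (ans total : Int)
    (h : pvInvA zs m cache ans total) :
    pvInvA zs (m + 1) (pvAStep (cache, ans, total) ((m : Int), zs.getD m (0, 0))).1
      (pvAStep (cache, ans, total) ((m : Int), zs.getD m (0, 0))).2.1
      (pvAStep (cache, ans, total) ((m : Int), zs.getD m (0, 0))).2.2 := by
  obtain ⟨hmle, htot, hnd, hitems, hcompl, hans0, hub, hat⟩ := h
  set e := zs.getD m (0, 0) with hedef
  have hsucc := pvP_succ zs 0 m hm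
  rw [← hedef] at hsucc
  have htot' : total + (e.1 - e.2)
      = PySem.List.pyGetD ((0 : Int) :: pvTail 0 zs) ((m : Int) + 1) 0 := by
    rw [hsucc, ← htot]
  have hkeys_fst : cache.keys = cache.items.map Prod.fst := by
    simp [PySem.Dict.keys]
  have hcast : (((m + 1 : Nat)) : Int) = (m : Int) + 1 := by push_cast; ring
  by_cases hc : cache.contains (total + (e.1 - e.2)) = true
  · -- value seen before: A takes the max with (i - first_index)
    have hsome : (cache.get? (total + (e.1 - e.2))).isSome := by
      rw [← PySem.Dict.contains_eq_isSome_get?]; exact hc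
    obtain ⟨c, hcget⟩ := Option.isSome_iff_exists.mp hsome
    have hcmem : (total + (e.1 - e.2), c) ∈ cache.items :=
      PySem.Dict.mem_items_of_get?_eq_some _ hcget
    have hgd : cache.getD (total + (e.1 - e.2)) 0 = c :=
      PySem.Dict.getD_of_mem_items cache hcmem hnd 0
    obtain ⟨hc1, hc2, hc3, hc4⟩ := hitems _ hcmem
    simp only [pvAStep, hc, if_true, hgd]
    refine ⟨by omega, by rw [hcast]; exact htot', hnd, ?_, ?_, ?_, ?_, ?_⟩
    · intro p hp
      obtain ⟨h1, h2, h3, h4⟩ := hitems p hp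
      refine ⟨h1, by clear hat; omega, h3, ?_⟩
      intro q hq1 hq2 hq3
      by_cases hqe : q = (m : Int) + 1
      · clear hat; omega
      · exact h4 q hq1 (by clear hat; omega) hq3
    · intro q hq1 hq2
      by_cases hqe : q = (m : Int) + 1
      · rw [hqe, ← htot']
        exact hc
      · exact hcompl q hq1 (by clear hat; omega)
    · clear hat; positivity
    · intro j i h1 h2 h3 h4
      by_cases hie : i = (m : Int) + 1
      · subst hie
        rw [← htot'] at h4
        have hj : c + 1 ≤ j := hc4 j h1 (by clear hat; omega) h4
        have hle : (m : Int) + 1 - j ≤ (m : Int) - c := by clear hat; omega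
        exact le_trans hle (le_max_right _ _)
      · exact le_trans (hub j i h1 h2 (by clear hat; omega) h4) (le_max_left _ _)
    · rcases max_cases ans ((m : Int) - c) with ⟨hmx, hge⟩ | ⟨hmx, hlt⟩
      · rw [hmx]
        rcases hat with h | ⟨j, i, h1, h2, h3, h4, h5⟩
        · exact Or.inl h
        · exact Or.inr ⟨j, i, h1, h2, by omega, h4, h5⟩
      · rw [hmx]
        clear hat
        refine Or.inr ⟨c + 1, (m : Int) + 1, by omega, by omega, by omega, ?_, by ring⟩
        rw [hc3, ← htot']
  · -- fresh value: A records its first occurrence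
    have hcf : cache.contains (total + (e.1 - e.2)) = false := by
      rw [Bool.not_eq_true] at hc; exact hc
    have hins := PySem.Dict.items_insert_of_not_contains cache ((m : Int)) hcf
    have hkeysins : (cache.insert (total + (e.1 - e.2)) ((m : Int))).keys
        = cache.keys ++ [total + (e.1 - e.2)] := by
      simp [PySem.Dict.keys, hins]
    have hnotin : ∀ q : Int, 0 ≤ q → q ≤ (m : Int) →
        PySem.List.pyGetD ((0 : Int) :: pvTail 0 zs) q 0 ≠ total + (e.1 - e.2) := by
      intro q hq1 hq2 hq3
      have := hcompl q hq1 hq2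
      rw [hq3] at this
      rw [this] at hcf
      exact Bool.noConfusion hcf
    simp only [pvAStep, hcf, Bool.false_eq_true, if_false]
    refine ⟨by omega, by rw [hcast]; exact htot', PySem.Dict.nodup_keys_insert _ _ _ hnd, ?_, ?_, hans0, ?_, ?_⟩
    · intro p hp
      rw [hins, List.mem_append, List.mem_singleton] at hp
      rcases hp with hp | rfl
      · obtain ⟨h1, h2, h3, h4⟩ := hitems p hp
        refine ⟨h1, by clear hat; omega, h3, ?_⟩
        intro q hq1 hq2 hq3
        by_cases hqe : q = (m : Int) + 1
        · clear hat; omega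
        · exact h4 q hq1 (by clear hat; omega) hq3
      · refine ⟨by clear hat; omega, by clear hat; omega, htot'.symm, ?_⟩
        intro q hq1 hq2 hq3
        simp only at hq3
        by_cases hql : q ≤ (m : Int)
        · exact absurd hq3 (hnotin q hq1 hql)
        · clear hat; omega
    · intro q hq1 hq2
      rw [PySem.Dict.contains_eq_decide_mem_keys, hkeysins]
      by_cases hqe : q = (m : Int) + 1
      · rw [hqe, ← htot']
        simp
      · have := hcompl q hq1 (by clear hat; omega)
        rw [PySem.Dict.contains_eq_decide_mem_keys] at this
        have hmem := of_decide_eq_true this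
        simp [hmem]
    · intro j i h1 h2 h3 h4
      by_cases hie : i = (m : Int) + 1
      · subst hie
        rw [← htot'] at h4
        exact absurd h4 (hnotin j h1 (by clear hat; omega))
      · exact hub j i h1 h2 (by clear hat; omega) h4
    · rcases hat with h | ⟨j, i, h1, h2, h3, h4, h5⟩
      · exact Or.inl h
      · exact Or.inr ⟨j, i, h1, h2, by omega, h4, h5⟩

lemma pvALoop (zs : List (Int × Int)) : ∀ (suffix : List (Int × Int)) (m : Nat)
    (cache : PySem.Dict Int Int) (ans total : Int),
    suffix = zs.drop m → pvInvA zs m cache ans total →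
    pvIsBest ((0 : Int) :: pvTail 0 zs)
      (((PySem.List.enumerate suffix (m : Int)).foldl pvAStep (cache, ans, total)).2.1) := by
  intro suffix
  induction suffix with
  | nil =>
    intro m cache ans total hs hinv
    obtain ⟨hm, -, -, -, -, hans0, hub, hat⟩ := hinv
    have hlen : zs.length ≤ m := by
      by_contra hc
      have := List.drop_eq_nil_iff.mp hs.symm
      omega
    have hm' : m = zs.length := by omega
    have hpl : (((0 : Int) :: pvTail 0 zs).length : Int) = (m : Int) + 1 := by
      simp [pvTail_length, hm']
    simp only [PySem.List.enumerate_nil, List.foldl_nil]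
    refine ⟨hans0, ?_, ?_⟩
    · intro j i h1 h2 h3 h4
      exact hub j i h1 h2 (by omega) h4
    · rcases hat with h | ⟨j, i, h1, h2, h3, h4, h5⟩
      · exact Or.inl h
      · exact Or.inr ⟨j, i, h1, h2, by omega, h4, h5⟩
  | cons e rest ih =>
    intro m cache ans total hs hinv
    have hmlt : m < zs.length := by
      by_contra hc
      rw [List.drop_eq_nil_of_le (by omega)] at hs
      simp at hs
    have hdrop := List.drop_eq_getElem_cons hmlt
    rw [hdrop] at hs
    have he : e = zs[m] := (List.cons.injEq _ _ _ _ ▸ hs).1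
    have hrest : rest = zs.drop (m + 1) := (List.cons.injEq _ _ _ _ ▸ hs).2
    have hgd : zs.getD m (0, 0) = e := by rw [List.getD_eq_getElem _ _ hmlt, he]
    rw [PySem.List.enumerate_cons]
    simp only [List.foldl_cons]
    have hstep := pvAStep_pres zs m hmlt cache ans total hinv
    rw [hgd] at hstep
    have hcast : ((m : Int) + 1) = ((m + 1 : Nat) : Int) := by push_cast; ring
    rw [hcast]
    exact ih (m + 1) _ _ _ hrest hstep

lemma pvPortA_eq (nums1 nums2 : List Int) (h : nums1.length ≤ nums2.length) :
    widestPairOfIndices nums1 nums2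
      = ((PySem.List.enumerate (nums1.zip nums2) 0).foldl pvAStep
          (PySem.Dict.ofList [((0 : Int), (-1 : Int))], (0 : Int), (0 : Int))).2.1 := by
  have hlen : PySem.List.len (nums1.zip nums2) = (nums1.length : Int) := by
    simp [List.length_zip]; omega
  rw [PySem.List.enumerate_eq_map_pyRange (nums1.zip nums2) ((0 : Int), (0 : Int)),
    List.foldl_map, hlen]
  simp only [widestPairOfIndices]
  refine congrArg (fun r : PySem.Dict Int Int × Int × Int => r.2.1) (PySem.List.foldl_congr_mem _ _ _ _ ?_)
  intro s j hj
  rw [PySem.List.mem_pyRange_one] at hj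
  have hj2 : j < ((nums1.zip nums2).length : Int) := by
    simp [List.length_zip]; omega
  have hzs : PySem.List.pyGetD (nums1.zip nums2) j ((0 : Int), (0 : Int))
      = (PySem.List.pyGetD nums1 j 0, PySem.List.pyGetD nums2 j 0) := by
    rw [PySem.List.pyGetD_eq_getElem _ _ hj.1 hj2,
      PySem.List.pyGetD_eq_getElem _ _ hj.1 (by omega),
      PySem.List.pyGetD_eq_getElem _ _ hj.1 (by omega)]
    exact List.getElem_zip
  simp [pvAStep, hzs]

lemma pvBInner (ps : List Int) (j : Int) : ∀ (cnt : Nat) (a best : Int),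
    ((ps.length : Int) - a).toNat = cnt →
    best ≤ ((PySem.List.pyRange a (ps.length : Int) 1).foldl
        (fun best i =>
          if PySem.List.pyGetD ps j 0 = PySem.List.pyGetD ps i 0 ∧ i - j > best then i - j
          else best) best) ∧
    (∀ i : Int, a ≤ i → i < (ps.length : Int) →
      PySem.List.pyGetD ps j 0 = PySem.List.pyGetD ps i 0 →
      i - j ≤ ((PySem.List.pyRange a (ps.length : Int) 1).foldl
        (fun best i =>
          if PySem.List.pyGetD ps j 0 = PySem.List.pyGetD ps i 0 ∧ i - j > best then i - j
          else best) best)) ∧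
    (((PySem.List.pyRange a (ps.length : Int) 1).foldl
        (fun best i =>
          if PySem.List.pyGetD ps j 0 = PySem.List.pyGetD ps i 0 ∧ i - j > best then i - j
          else best) best) = best ∨
      ∃ i : Int, a ≤ i ∧ i < (ps.length : Int) ∧
        PySem.List.pyGetD ps j 0 = PySem.List.pyGetD ps i 0 ∧
        ((PySem.List.pyRange a (ps.length : Int) 1).foldl
        (fun best i =>
          if PySem.List.pyGetD ps j 0 = PySem.List.pyGetD ps i 0 ∧ i - j > best then i - j
          else best) best) = i - j) := by
  intro cnt
  induction cnt with
  | zero =>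
    intro a best h
    rw [PySem.List.pyRange_one_eq_nil (by omega)]
    refine ⟨le_refl _, ?_, Or.inl rfl⟩
    intro i hi1 hi2 _
    omega
  | succ n ih =>
    intro a best h
    rw [PySem.List.pyRange_one_cons (by omega)]
    simp only [List.foldl_cons]
    set best1 := (if PySem.List.pyGetD ps j 0 = PySem.List.pyGetD ps a 0 ∧ a - j > best
      then a - j else best) with hb1def
    obtain ⟨ih1, ih2, ih3⟩ := ih (a + 1) best1 (by omega)
    have hb1 : best ≤ best1 := by
      rw [hb1def]; split_ifs with hcond
      · omega
      · exact le_refl _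
    refine ⟨le_trans hb1 ih1, ?_, ?_⟩
    · intro i hi1 hi2 heq
      rcases eq_or_lt_of_le hi1 with rfl | hlt
      · have haj : a - j ≤ best1 := by
          rw [hb1def]; split_ifs with hcond
        
          · omega
          · simp only [not_and, not_lt] at hcond
            exact hcond heq
        exact le_trans haj ih1
      · exact ih2 i (by omega) hi2 heq
    · rcases ih3 with heqb | ⟨i, hi1, hi2, hi3, hi4⟩
      · rw [heqb, hb1def]
        split_ifs with hcond
        · exact Or.inr ⟨a, le_refl _, by omega, hcond.1, rfl⟩
        · exact Or.inl rfl
      · exact Or.inr ⟨i, by omega, hi2, hi3, hi4⟩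

lemma pvBOuter (ps : List Int) : ∀ (cnt : Nat) (a best : Int),
    ((ps.length : Int) - a).toNat = cnt → 0 ≤ a → 0 ≤ best →
    (∀ j i : Int, 0 ≤ j → j < i → i < (ps.length : Int) → j < a →
      PySem.List.pyGetD ps j 0 = PySem.List.pyGetD ps i 0 → i - j ≤ best) →
    (best = 0 ∨ ∃ j i : Int, 0 ≤ j ∧ j < i ∧ i < (ps.length : Int) ∧
      PySem.List.pyGetD ps j 0 = PySem.List.pyGetD ps i 0 ∧ best = i - j) →
    pvIsBest ps ((PySem.List.pyRange a (ps.length : Int) 1).foldl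
      (fun best j =>
        (PySem.List.pyRange (j + 1) (ps.length : Int) 1).foldl
          (fun best i =>
            if PySem.List.pyGetD ps j 0 = PySem.List.pyGetD ps i 0 ∧ i - j > best then i - j
            else best) best) best) := by
  intro cnt
  induction cnt with
  | zero =>
    intro a best h ha hb hub hat
    rw [PySem.List.pyRange_one_eq_nil (by omega)]
    exact ⟨hb, fun j i h1 h2 h3 h4 => hub j i h1 h2 h3 (by omega) h4, hat⟩
  | succ n ih =>
    intro a best h ha hb hub hat
    rw [PySem.List.pyRange_one_cons (by omega)]
    simp only [List.foldl_cons]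
    have hcnt : (((ps.length : Int)) - (a + 1)).toNat = n := by clear hat hub; omega
    have ha1 : (0 : Int) ≤ a + 1 := by clear hat hub; omega
    obtain ⟨in1, in2, in3⟩ := pvBInner ps a (((ps.length : Int)) - (a + 1)).toNat (a + 1) best rfl
    set best1 := (PySem.List.pyRange (a + 1) (ps.length : Int) 1).foldl
      (fun best i =>
        if PySem.List.pyGetD ps a 0 = PySem.List.pyGetD ps i 0 ∧ i - a > best then i - a
        else best) best with hb1def
    refine ih (a + 1) best1 hcnt ha1 (le_trans hb in1) ?_ ?_
    · intro j i h1 h2 h3 h4 h5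
      rcases eq_or_lt_of_le (show j ≤ a by omega) with rfl | hlt
      · exact in2 i (by omega) h3 h5
      · exact le_trans (hub j i h1 h2 h3 (by omega) h5) in1
    · rcases in3 with heqb | ⟨i, hi1, hi2, hi3, hi4⟩
      · rw [heqb]
        rcases hat with h0 | ⟨j, i, hj⟩
        · exact Or.inl h0
        · exact Or.inr ⟨j, i, hj⟩
      · exact Or.inr ⟨a, i, ha, by omega, hi2, hi3, hi4⟩

lemma pvPortB_isBest (nums1 nums2 : List Int) :
    pvIsBest ((0 : Int) :: pvTail 0 (nums1.zip nums2))
      (widestPairOfIndices_alt nums1 nums2) := by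
  have hps : ((nums1.zip nums2).foldl (fun (s : List Int × Int) ab =>
      let t := s.2 + (ab.1 - ab.2)
      (s.1 ++ [t], t)) ([(0 : Int)], (0 : Int))).1 = (0 : Int) :: pvTail 0 (nums1.zip nums2) := by
    rw [pvBuild]; rfl
  show pvIsBest _ (widestPairOfIndices_alt nums1 nums2)
  unfold widestPairOfIndices_alt
  simp only [hps]
  exact pvBOuter _ ((((0 : Int) :: pvTail 0 (nums1.zip nums2)).length : Int) - 0).toNat 0 0
    rfl (le_refl _) (le_refl _)
    (fun j i h1 h2 h3 h4 h5 => absurd h4 (by omega))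
    (Or.inl rfl)

-- ===== VERDICT (by name: the statement is the Claim_ definition above) =====
theorem widestPairOfIndices_spec : Claim_equal_widestPairOfIndices := by
  intro nums1 nums2 _ hpre
  unfold Spec_widestPairOfIndices
  have hA : pvIsBest ((0 : Int) :: pvTail 0 (nums1.zip nums2))
      (widestPairOfIndices nums1 nums2) := by
    rw [pvPortA_eq nums1 nums2 hpre]
    refine pvALoop _ _ 0 _ _ _ (by simp) ?_
    refine ⟨Nat.zero_le _, ?_, by decide, ?_, ?_, le_refl _, ?_, Or.inl rfl⟩
    · rw [Nat.cast_zero, pvP_zero]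
    · intro p hp
      have hp' : p = ((0 : Int), (-1 : Int)) := by
        have : (PySem.Dict.ofList [((0 : Int), (-1 : Int))]).items
            = [((0 : Int), (-1 : Int))] := by decide
        rw [this, List.mem_singleton] at hp
        exact hp
      subst hp'
      refine ⟨by omega, by omega, ?_, ?_⟩
      · rw [show (-1 : Int) + 1 = 0 by ring, pvP_zero]
      · intro q hq1 hq2 _
        omega
    · intro q hq1 hq2
      have hq : q = 0 := by omega
      rw [hq, pvP_zero]
      decide
    · intro j i h1 h2 h3 _
      omega
  exact pvIsBest_unique hA (pvPortB_isBest nums1 nums2)
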